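-- pv_equiv track=rewrite | github.com/kodsnack/advent_of_code_2017 | hbldh-python3/day20.py | _remove_collisons
-- ===== SOURCE A (Python) =====
-- import itertools
--
-- def _remove_collisons(particles):
--     particles.sort(key=lambda x: x[1:4])
--     surviving_particles = []
--     for position, p_present in itertools.groupby(
--             particles, lambda x: tuple(x[1:4])):
--         ps = [p for p in p_present]
--         if len(ps) > 1:
--             # Collision.
--             continue
--         else:
--             surviving_particles += ps
--     return surviving_particles
-- ===== SOURCE B (Python) =====
-- def _remove_collisons(particles):
--     particles.sort(key=lambda x: x[1:4])
--     counts = {}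
--     for p in particles:
--         k = tuple(p[1:4])
--         counts[k] = counts.get(k, 0) + 1
--     return [p for p in particles if counts.get(tuple(p[1:4]), 0) == 1]
-- ===== Notes on version B (the rewrite author's own statement) =====
-- stated objective: alternative
-- what changed: A makes one itertools.groupby pass over the sorted list collecting consecutive runs and keeping length-1 runs; B instead builds a frequency dict of the position keys in one pass and then filters the sorted list keeping particles whose position occurs exactly once (the in-place sort is kept in both).
import Mathlib
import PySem

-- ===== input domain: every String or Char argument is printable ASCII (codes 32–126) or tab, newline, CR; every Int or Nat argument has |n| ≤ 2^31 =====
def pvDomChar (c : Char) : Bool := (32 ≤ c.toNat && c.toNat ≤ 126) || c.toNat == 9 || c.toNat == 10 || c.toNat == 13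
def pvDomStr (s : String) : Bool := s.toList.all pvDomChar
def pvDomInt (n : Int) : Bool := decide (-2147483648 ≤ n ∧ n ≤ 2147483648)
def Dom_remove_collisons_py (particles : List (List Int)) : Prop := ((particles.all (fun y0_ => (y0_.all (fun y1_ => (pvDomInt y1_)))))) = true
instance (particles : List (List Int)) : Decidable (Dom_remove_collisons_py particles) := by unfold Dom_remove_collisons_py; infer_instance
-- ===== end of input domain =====

-- B replaces A's single consecutive-groupby pass with a count-all-then-filter pair of passes
-- (a hand-built frequency dict over the position keys, then a filter keeping positions seen
-- exactly once). Both versions sort `particles` in place first (the same observable mutation);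
-- the equivalence proved here is about the return value.

-- ===== PORT A =====
-- helper: itertools.groupby(l, key) run structure — the maximal consecutive runs of key-equal elements
def gruns {α κ : Type} [BEq κ] (key : α → κ) : List α → List (List α)
  | [] => []
  | x :: xs => (x :: xs.takeWhile (fun y => key y == key x)) :: gruns key (xs.dropWhile (fun y => key y == key x))
  termination_by l => l.length
  decreasing_by
    simp only [List.length_cons]
    exact Nat.lt_succ_of_le (List.length_dropWhile_le _ _)

def remove_collisons_py (particles : List (List Int)) : List (List Int) :=
  let particles := PySem.List.sorted particles (fun x => PySem.List.slice x (some 1) (some 4)) false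
  (gruns (fun x => PySem.List.slice x (some 1) (some 4)) particles).foldl
    (fun acc ps => if ps.length > 1 then acc else acc ++ ps) []

-- ===== PORT B =====
def remove_collisons_py_alt (particles : List (List Int)) : List (List Int) :=
  let particles := PySem.List.sorted particles (fun x => PySem.List.slice x (some 1) (some 4)) false
  let counts := particles.foldl
    (fun d p => d.insert (PySem.List.slice p (some 1) (some 4))
                  (d.getD (PySem.List.slice p (some 1) (some 4)) 0 + 1))
    PySem.Dict.empty
  particles.filter (fun p => counts.getD (PySem.List.slice p (some 1) (some 4)) 0 == (1 : Int))

-- ===== PRECONDITION & SPEC =====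
def Spec_remove_collisons_py (particles : List (List Int)) (out : List (List Int)) : Prop := out = remove_collisons_py_alt particles
instance (particles : List (List Int)) (out : List (List Int)) : Decidable (Spec_remove_collisons_py particles out) := by unfold Spec_remove_collisons_py; infer_instance

-- ===== CLAIM (what is proved, stated in full; the proofs are below) =====
def Claim_equal_remove_collisons_py : Prop := ∀ (particles : List (List Int)), Dom_remove_collisons_py particles → Spec_remove_collisons_py particles (remove_collisons_py particles)

-- ===== LEMMAS AND PROOFS =====

-- On any list whose key sequence is sorted (so key-equal elements are consecutive), keeping the
-- length-1 groupby runs is the same as keeping the elements whose key occurs exactly once.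
theorem gruns_main {α κ : Type} [LinearOrder κ] [BEq κ] [LawfulBEq κ] (key : α → κ) :
    ∀ l : List α, l.Pairwise (fun a b => key a ≤ key b) →
    (gruns key l).foldl (fun acc ps => if ps.length > 1 then acc else acc ++ ps) [] =
      l.filter (fun p => ((l.map key).count (key p) : Int) == (1 : Int)) := by
  have hstep : ∀ (rest : List (List α)) (a : List α),
      rest.foldl (fun acc ps => if ps.length > 1 then acc else acc ++ ps) a
        = a ++ rest.flatMap (fun ps => if ps.length > 1 then [] else ps) := by
    intro rest a
    rw [show (fun (acc ps : List α) => if ps.length > 1 then acc else acc ++ ps)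
          = (fun acc ps => acc ++ (if ps.length > 1 then [] else ps)) from by
      funext acc ps; split <;> simp]
    exact PySem.List.foldl_append_eq_flatMap _ _ _
  intro l
  induction l using gruns.induct (key := key) with
  | case1 => intro _; simp [gruns]
  | case2 x xs ih =>
    intro h
    obtain ⟨t1, ht1⟩ : ∃ t, xs.takeWhile (fun y => key y == key x) = t := ⟨_, rfl⟩
    obtain ⟨t2, ht2⟩ : ∃ t, xs.dropWhile (fun y => key y == key x) = t := ⟨_, rfl⟩
    have hxs : xs = t1 ++ t2 := by rw [← ht1, ← ht2, List.takeWhile_append_dropWhile]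
    have hhead : ∀ y ∈ xs, key x ≤ key y := (List.pairwise_cons.mp h).1
    have hpxs : xs.Pairwise (fun a b => key a ≤ key b) := (List.pairwise_cons.mp h).2
    have hpt2 : t2.Pairwise (fun a b => key a ≤ key b) := by
      rw [← ht2]; exact hpxs.sublist (List.dropWhile_sublist _)
    have ht1eq : ∀ y ∈ t1, key y = key x := by
      intro y hy
      rw [← ht1] at hy
      have := List.mem_takeWhile_imp hy
      simpa using this
    have hne : ∀ y ∈ t2, key y ≠ key x := by
      cases hcz : t2 with
      | nil => simp
      | cons z t2' =>
        have hz : (key z == key x) = false := by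
          have := List.head?_dropWhile_not (fun y => key y == key x) xs
          rw [ht2, hcz] at this; simpa using this
        have hzx : key z ≠ key x := by simpa using hz
        intro y hy
        rcases List.mem_cons.mp hy with rfl | hy'
        · exact hzx
        · intro hyx
          have h1 : key z ≤ key y := by
            rw [hcz] at hpt2
            exact (List.pairwise_cons.mp hpt2).1 y hy'
          have h2 : key x ≤ key z := by
            apply hhead
            rw [hxs, hcz]
            exact List.mem_append_right _ List.mem_cons_self
          exact hzx (le_antisymm (h1.trans (le_of_eq hyx)) h2)
    have ht1rep : t1.map key = List.replicate t1.length (key x) := by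
      have := List.eq_replicate_of_mem (a := key x) (l := t1.map key) (by
        intro b hb
        rcases List.mem_map.mp hb with ⟨y, hy, rfl⟩
        exact ht1eq y hy)
      simpa using this
    -- unfold one step and rewrite everything into the t1/t2 world
    rw [gruns, ht1, ht2, hstep, hxs]
    have ihe : (gruns key t2).flatMap (fun ps => if ps.length > 1 then [] else ps)
        = t2.filter (fun p => ((t2.map key).count (key p) : Int) == (1 : Int)) := by
      rw [ht2] at ih
      have := ih hpt2
      rw [hstep] at this
      simpa using this
    simp only [List.flatMap_cons, List.nil_append, ihe, List.filter_cons, List.filter_append]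
    have h0 : (t2.map key).count (key x) = 0 := by
      rw [List.count_eq_zero]
      intro hmem
      rcases List.mem_map.mp hmem with ⟨y, hy, hk⟩
      exact hne y hy hk
    have hcx : (((x :: (t1 ++ t2)).map key).count (key x) : Int) = t1.length + 1 := by
      rw [List.map_cons, List.map_append, List.count_cons_self, List.count_append, ht1rep,
        List.count_replicate_self]
      rw [h0]
      push_cast
      ring
    have hct2 : ∀ p ∈ t2, ((x :: (t1 ++ t2)).map key).count (key p) = (t2.map key).count (key p) := by
      intro p hp
      rw [List.map_cons, List.map_append, List.count_cons, List.count_append, ht1rep,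
        List.count_replicate]
      have hne'' : ¬ ((key x == key p) = true) := by
        simp only [beq_iff_eq]
        intro hh; exact hne p hp hh.symm
      simp [hne'']
    have hfil2 : t2.filter (fun p => (((x :: (t1 ++ t2)).map key).count (key p) : Int) == (1 : Int))
        = t2.filter (fun p => ((t2.map key).count (key p) : Int) == (1 : Int)) := by
      apply List.filter_congr
      intro p hp
      rw [hct2 p hp]
    rw [hfil2]
    cases t1 with
    | nil =>
      have hx1 : ((((x :: ([] ++ t2)).map key).count (key x) : Int) == (1 : Int)) = true := by
        rw [hcx]; simp
      simp [h0]
    | cons w t1' =>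
      have hx1 : ((((x :: ((w :: t1') ++ t2)).map key).count (key x) : Int) == (1 : Int)) = false := by
        rw [hcx]
        simp only [List.length_cons, beq_eq_false_iff_ne, ne_eq]
        intro hh
        push_cast at hh
        omega
      have hfil1 : (w :: t1').filter (fun p => (((x :: ((w :: t1') ++ t2)).map key).count (key p) : Int) == (1 : Int)) = [] := by
        rw [List.filter_eq_nil_iff]
        intro y hy
        rw [ht1eq y hy, hcx]
        simp only [List.length_cons, beq_eq_false_iff_ne, ne_eq, Bool.not_eq_true]
        intro hh
        push_cast at hh
        omega
      rw [hx1, hfil1]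
      simp

theorem sorted_pairwise' (xs : List (List Int)) :
    (PySem.List.sorted xs (fun x => PySem.List.slice x (some 1) (some 4)) false).Pairwise
      (fun a b => PySem.List.slice a (some 1) (some 4) ≤ PySem.List.slice b (some 1) (some 4)) := by
  have h := PySem.List.sorted_pairwise (κ := List Int) xs (fun x => PySem.List.slice x (some 1) (some 4))
  convert h using 2

-- ===== VERDICT (by name: the statement is the Claim_ definition above) =====
theorem remove_collisons_py_spec : Claim_equal_remove_collisons_py := by
  intro particles _
  unfold Spec_remove_collisons_py remove_collisons_py remove_collisons_py_alt
  simp only []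
  set s := PySem.List.sorted particles (fun x => PySem.List.slice x (some 1) (some 4)) false with hs
  have hcnt : (s.foldl
      (fun d p => d.insert (PySem.List.slice p (some 1) (some 4))
        (d.getD (PySem.List.slice p (some 1) (some 4)) 0 + 1))
      PySem.Dict.empty)
      = PySem.Dict.counter (s.map (fun q => PySem.List.slice q (some 1) (some 4))) := by
    have h := PySem.Dict.foldl_insert_getD_add_one_eq_counter
      (s.map (fun q => PySem.List.slice q (some 1) (some 4)))
    rw [List.foldl_map] at h
    exact h
  rw [hcnt, gruns_main (fun x => PySem.List.slice x (some 1) (some 4)) s (sorted_pairwise' particles)]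
  apply List.filter_congr
  intro p _
  rw [PySem.Dict.getD_counter]
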